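-- pv_equiv track=rewrite | github.com/knitty-kim/ProgrammersSolvingCode | 프로그래머스/1/67256. ［카카오 인턴］ 키패드 누르기/［카카오 인턴］ 키패드 누르기.py | solution
-- ===== SOURCE A (Python) =====
-- def solution(numbers, hand):
--
--     for i in range(len(numbers)):
--         if numbers[i] == 0:
--             numbers[i] = 11
--
--     left = 10
--     right = 12
--     li = []
--     l_side = [1, 4, 7, 10]
--     r_side = [3, 6, 9, 12]
--     center = [2, 5, 8, 11]
--     for i in numbers:
--         if i in l_side:
--             left = i
--             li.append('L')
--         elif i in r_side:
--             right = i
--             li.append('R')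
--         else:
--             if left in center:
--                 left_dis = abs(center.index(i) - center.index(left))
--             else:
--                 left_dis = abs(l_side.index(i-1) - l_side.index(left)) + 1
--             if right in center:
--                 right_dis = abs(center.index(i) - center.index(right))
--             else:
--                 right_dis = abs(r_side.index(i+1) - r_side.index(right)) + 1
--
--             if left_dis < right_dis:
--                 left = i
--                 li.append('L')
--             elif left_dis > right_dis:
--                 right = i
--                 li.append('R')
--             else:
--                 if hand == 'right':
--                     right = i
--                     li.append('R')
--                 else:
--                     left = i
--                     li.append('L')
--
--     return ''.join(i for i in li)
-- ===== SOURCE B (Python) =====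
-- def solution(numbers, hand):
--     # Same in-place preprocessing as the original: 0 becomes 11 (mutates numbers).
--     for i in range(len(numbers)):
--         if numbers[i] == 0:
--             numbers[i] = 11
--
--     def coord(k):
--         # key k (1..12, '*'=10, '0'=11, '#'=12) at row (k-1)//3, col (k-1)%3
--         return (k - 1) // 3, (k - 1) % 3
--
--     def dist(a, b):
--         (ar, ac), (br, bc) = coord(a), coord(b)
--         return abs(ar - br) + abs(ac - bc)
--
--     def thumb(log, side, default):
--         # position of a thumb = most recent key it pressed (derived, not stored)
--         for k, p in reversed(log):
--             if p == side:
--                 return k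
--         return default
--
--     log = []  # event log of (key, 'L'/'R') presses; thumb positions derived from it
--     for n in numbers:
--         col = (n - 1) % 3
--         if col == 0:
--             p = 'L'
--         elif col == 2:
--             p = 'R'
--         else:
--             ld = dist(thumb(log, 'L', 10), n)
--             rd = dist(thumb(log, 'R', 12), n)
--             if ld != rd:
--                 p = 'L' if ld < rd else 'R'
--             else:
--                 p = 'R' if hand == 'right' else 'L'
--         log.append((n, p))
--     return ''.join(p for _, p in log)
-- ===== Notes on version B (the rewrite author's own statement) =====
-- stated objective: alternative
-- what changed: B keeps no thumb-position state at all: it records an event log of (key, press) pairs and, for a center-column key, derives each thumb's position by scanning the log backwards for that thumb's most recent press, comparing grid Manhattan distances computed from the key number, instead of A's carried left/right variables with three hard-coded key lists and index()-based distance cases.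
import Mathlib
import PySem

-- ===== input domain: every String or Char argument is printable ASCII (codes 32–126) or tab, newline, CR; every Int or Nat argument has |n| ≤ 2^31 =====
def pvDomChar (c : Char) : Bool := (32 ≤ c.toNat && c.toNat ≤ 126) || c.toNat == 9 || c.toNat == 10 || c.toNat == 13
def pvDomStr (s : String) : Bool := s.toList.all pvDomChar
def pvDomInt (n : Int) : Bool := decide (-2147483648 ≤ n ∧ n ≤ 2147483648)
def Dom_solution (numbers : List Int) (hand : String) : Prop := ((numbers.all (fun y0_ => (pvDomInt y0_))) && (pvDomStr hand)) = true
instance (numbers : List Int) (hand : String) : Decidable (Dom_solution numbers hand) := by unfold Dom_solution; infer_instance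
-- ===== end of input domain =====

-- B drops A's carried left/right thumb state: it keeps an event log of (key, press)
-- pairs and re-derives each thumb's position by a backward scan of the log, with grid
-- Manhattan distances computed from the key number (alternative structure, O(n^2)).
-- Both Pythons mutate `numbers` in place (0 -> 11) identically; the equivalence
-- proved is about the return value.

-- ===== PORT A =====
def pvA_lside : List Int := [1, 4, 7, 10]
def pvA_rside : List Int := [3, 6, 9, 12]
def pvA_center : List Int := [2, 5, 8, 11]

-- list.index(v); Python raises ValueError when v is absent — those inputs are excluded by Pre_solution
def pvA_idx (xs : List Int) (v : Int) : Int :=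
  ((PySem.List.index? xs v).getD 0 : Nat)

def pvA_step (hand : String) (st : Int × Int × List Char) (i : Int) : Int × Int × List Char :=
  let left := st.1
  let right := st.2.1
  let li := st.2.2
  if i ∈ pvA_lside then (i, right, li ++ ['L'])
  else if i ∈ pvA_rside then (left, i, li ++ ['R'])
  else
    let left_dis : Int :=
      if left ∈ pvA_center then ((pvA_idx pvA_center i - pvA_idx pvA_center left).natAbs : Int)
      else ((pvA_idx pvA_lside (i - 1) - pvA_idx pvA_lside left).natAbs : Int) + 1
    let right_dis : Int :=
      if right ∈ pvA_center then ((pvA_idx pvA_center i - pvA_idx pvA_center right).natAbs : Int)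
      else ((pvA_idx pvA_rside (i + 1) - pvA_idx pvA_rside right).natAbs : Int) + 1
    if left_dis < right_dis then (i, right, li ++ ['L'])
    else if right_dis < left_dis then (left, i, li ++ ['R'])
    else if hand = "right" then (left, i, li ++ ['R'])
    else (i, right, li ++ ['L'])

def solution (numbers : List Int) (hand : String) : String :=
  let numbers := numbers.map (fun n => if n = 0 then (11 : Int) else n)
  let st := numbers.foldl (pvA_step hand) (10, 12, [])
  String.ofList st.2.2

-- ===== PORT B =====
-- coord(k) = ((k-1)//3, (k-1)%3)
def pvB_coord (k : Int) : Int × Int :=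
  (PySem.Int.floordiv (k - 1) 3, PySem.Int.mod (k - 1) 3)

-- dist(a, b): Manhattan distance on the grid
def pvB_dist (a b : Int) : Int :=
  (((pvB_coord a).1 - (pvB_coord b).1).natAbs : Int) +
    (((pvB_coord a).2 - (pvB_coord b).2).natAbs : Int)

-- thumb(log, side, default): scan reversed(log) for the most recent press of `side`
def pvB_thumb : List (Int × Char) → Char → Int → Int
  | [], _, d => d
  | (k, p) :: t, side, d => if p = side then k else pvB_thumb t side d

def pvB_press (hand : String) (log : List (Int × Char)) (n : Int) : Char :=
  let col := PySem.Int.mod (n - 1) 3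
  if col = 0 then 'L'
  else if col = 2 then 'R'
  else
    let ld := pvB_dist (pvB_thumb log.reverse 'L' 10) n
    let rd := pvB_dist (pvB_thumb log.reverse 'R' 12) n
    if ld ≠ rd then (if ld < rd then 'L' else 'R')
    else if hand = "right" then 'R' else 'L'

def solution_alt (numbers : List Int) (hand : String) : String :=
  let numbers := numbers.map (fun n => if n = 0 then (11 : Int) else n)
  let log := numbers.foldl (fun log n => log ++ [(n, pvB_press hand log n)]) []
  String.ofList (log.map (·.2))

-- ===== PRECONDITION & SPEC =====
-- Pre_ excludes exactly the inputs on which A raises ValueError: some element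
-- outside the keypad range 0..12 (list.index on a key absent from every key list).
def Pre_solution (numbers : List Int) (hand : String) : Prop :=
  ∀ n ∈ numbers, 0 ≤ n ∧ n ≤ 12
instance (numbers : List Int) (hand : String) : Decidable (Pre_solution numbers hand) := by
  unfold Pre_solution; infer_instance

def pvWitness_solution : List Int × String := ([1, 3, 4, 5, 8, 2, 1, 4, 5, 9, 5, 0], "right")

def Spec_solution (numbers : List Int) (hand : String) (out : String) : Prop := out = solution_alt numbers hand
instance (numbers : List Int) (hand : String) (out : String) : Decidable (Spec_solution numbers hand out) := by unfold Spec_solution; infer_instance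

-- ===== CLAIM (what is proved, stated in full; the proofs are below) =====
def Claim_equal_solution : Prop := ∀ (numbers : List Int) (hand : String), Dom_solution numbers hand → Pre_solution numbers hand → Spec_solution numbers hand (solution numbers hand)

-- ===== LEMMAS AND PROOFS =====

-- All keypad keys after the 0 -> 11 replacement
def pvKeys : List Int := [1, 2, 3, 4, 5, 6, 7, 8, 9, 10, 11, 12]
-- possible values of A's `left` / `right` variables
def pvLA : List Int := [1, 2, 4, 5, 7, 8, 10, 11]
def pvRA : List Int := [2, 3, 5, 6, 8, 9, 11, 12]

-- booleanized A step (hand replaced by the Bool `hand = "right"`), acc-free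
def pvAbsA (b : Bool) (la ra i : Int) : Int × Int × Char :=
  if i ∈ pvA_lside then (i, ra, 'L')
  else if i ∈ pvA_rside then (la, i, 'R')
  else
    let left_dis : Int :=
      if la ∈ pvA_center then ((pvA_idx pvA_center i - pvA_idx pvA_center la).natAbs : Int)
      else ((pvA_idx pvA_lside (i - 1) - pvA_idx pvA_lside la).natAbs : Int) + 1
    let right_dis : Int :=
      if ra ∈ pvA_center then ((pvA_idx pvA_center i - pvA_idx pvA_center ra).natAbs : Int)
      else ((pvA_idx pvA_rside (i + 1) - pvA_idx pvA_rside ra).natAbs : Int) + 1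
    if left_dis < right_dis then (i, ra, 'L')
    else if right_dis < left_dis then (la, i, 'R')
    else if b then (la, i, 'R')
    else (i, ra, 'L')

-- booleanized B decision with the two derived thumb positions as parameters
def pvAbsB (b : Bool) (la ra n : Int) : Char :=
  let col := PySem.Int.mod (n - 1) 3
  if col = 0 then 'L'
  else if col = 2 then 'R'
  else
    let ld := pvB_dist la n
    let rd := pvB_dist ra n
    if ld ≠ rd then (if ld < rd then 'L' else 'R')
    else if b then 'R' else 'L'

lemma bridgeA (hand : String) (la ra : Int) (acc : List Char) (i : Int) :
    pvA_step hand (la, ra, acc) i =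
      ((pvAbsA (hand = "right") la ra i).1, (pvAbsA (hand = "right") la ra i).2.1,
        acc ++ [(pvAbsA (hand = "right") la ra i).2.2]) := by
  by_cases hh : hand = "right" <;>
    simp only [pvA_step, pvAbsA, hh, decide_true, decide_false, if_true, if_false] <;>
    split_ifs <;> first | rfl | simp_all

lemma bridgeB (hand : String) (log : List (Int × Char)) (n : Int) :
    pvB_press hand log n =
      pvAbsB (hand = "right") (pvB_thumb log.reverse 'L' 10) (pvB_thumb log.reverse 'R' 12) n := by
  by_cases hh : hand = "right" <;>
    simp only [pvB_press, pvAbsB, hh, decide_true, decide_false, if_true, if_false, Bool.false_eq_true]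

-- appending one press to the log updates the derived thumb positions pointwise
lemma thumb_append (log : List (Int × Char)) (n : Int) (p side : Char) (d : Int) :
    pvB_thumb (log ++ [(n, p)]).reverse side d =
      if p = side then n else pvB_thumb log.reverse side d := by
  simp [pvB_thumb]

-- the finite core: B's log-derived decision agrees with A's step on every reachable
-- state and key, and the updated state stays reachable
lemma step_check : ∀ b : Bool,
    (pvKeys.all fun i => pvLA.all fun la => pvRA.all fun ra =>
      decide (pvAbsB b la ra i = (pvAbsA b la ra i).2.2
        ∧ (pvAbsA b la ra i).1 = (if (pvAbsA b la ra i).2.2 = 'L' then i else la)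
        ∧ (pvAbsA b la ra i).2.1 = (if (pvAbsA b la ra i).2.2 = 'R' then i else ra)
        ∧ (pvAbsA b la ra i).1 ∈ pvLA ∧ (pvAbsA b la ra i).2.1 ∈ pvRA)) = true := by
  decide

lemma run_eq (hand : String) :
    ∀ (ns : List Int), (∀ n ∈ ns, n ∈ pvKeys) →
      ∀ (log : List (Int × Char)) (la ra : Int), la ∈ pvLA → ra ∈ pvRA →
        pvB_thumb log.reverse 'L' 10 = la → pvB_thumb log.reverse 'R' 12 = ra →
        (ns.foldl (fun log n => log ++ [(n, pvB_press hand log n)]) log).map (·.2) =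
          (ns.foldl (pvA_step hand) (la, ra, log.map (·.2))).2.2 := by
  intro ns
  induction ns with
  | nil => intro _ log la ra _ _ _ _; rfl
  | cons i t ih =>
    intro hmem log la ra hla hra hl hr
    have hi : i ∈ pvKeys := hmem i (List.mem_cons_self ..)
    have hc := step_check (hand = "right")
    rw [List.all_eq_true] at hc
    have hc := hc i hi
    rw [List.all_eq_true] at hc
    have hc := hc la hla
    rw [List.all_eq_true] at hc
    have hc := hc ra hra
    rw [decide_eq_true_iff] at hc
    obtain ⟨hdec, hupL, hupR, hla', hra'⟩ := hc
    have hp : pvB_press hand log i = (pvAbsA (hand = "right") la ra i).2.2 := by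
      rw [bridgeB, hl, hr, hdec]
    simp only [List.foldl_cons, bridgeA, hp]
    have := ih (fun n hn => hmem n (List.mem_cons_of_mem _ hn))
      (log ++ [(i, (pvAbsA (hand = "right") la ra i).2.2)])
      (pvAbsA (hand = "right") la ra i).1 (pvAbsA (hand = "right") la ra i).2.1
      hla' hra'
      (by rw [thumb_append, hl, ← hupL])
      (by rw [thumb_append, hr, ← hupR])
    simpa using this

-- ===== VERDICT (by name: the statement is the Claim_ definition above) =====
theorem solution_spec : Claim_equal_solution := by
  intro numbers hand _ hpre
  unfold Spec_solution solution solution_alt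
  have hmem : ∀ n ∈ numbers.map (fun n => if n = 0 then (11 : Int) else n), n ∈ pvKeys := by
    intro n hn
    rcases List.mem_map.mp hn with ⟨m, hm, rfl⟩
    obtain ⟨h0, h12⟩ := hpre m hm
    interval_cases m <;> decide
  have h := run_eq hand (numbers.map (fun n => if n = 0 then (11 : Int) else n)) hmem [] 10 12
    (by decide) (by decide) rfl rfl
  simp only [h]
  rfl
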